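-- pv_equiv track=rewrite | github.com/vintagevikas090/Python_Programming | Python Practice Codes/Practice_problems/Check_str_wrt_to_coditions.py | is_valid_string
-- ===== SOURCE A (Python) =====
-- def is_valid_string(st):
--     if len(st)==0:
--         return True
--     if st[0]=='a':
--         return is_valid_string(st[1:])
--     if st.startswith('bb'):
--         return is_valid_string(st[2:])
--     return False
-- ===== SOURCE B (Python) =====
-- def is_valid_string(st):
--     i, n = 0, len(st)
--     while i < n:
--         if st[i] == 'a':
--             i += 1
--         elif st[i] == 'b' and i + 1 < n and st[i + 1] == 'b':
--             i += 2
--         else: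
--             return False
--     return True
-- ===== Notes on version B (the rewrite author's own statement) =====
-- stated objective: faster
-- what changed: replaced the recursive slicing (each call copies the remaining string) by a single linear index-pointer scan that never copies
import Mathlib
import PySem

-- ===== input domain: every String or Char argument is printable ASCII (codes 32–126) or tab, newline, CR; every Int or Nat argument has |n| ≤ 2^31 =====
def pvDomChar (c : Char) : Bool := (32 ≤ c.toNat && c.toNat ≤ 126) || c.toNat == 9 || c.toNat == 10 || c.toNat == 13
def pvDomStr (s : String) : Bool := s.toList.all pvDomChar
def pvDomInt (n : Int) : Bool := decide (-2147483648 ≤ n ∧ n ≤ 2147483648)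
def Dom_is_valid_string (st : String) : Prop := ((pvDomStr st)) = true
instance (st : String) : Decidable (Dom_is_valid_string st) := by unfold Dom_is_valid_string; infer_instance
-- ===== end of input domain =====

-- B replaces A's recursive slicing with a single index-pointer scan that never copies the string (objective: faster by avoiding slice copies).

-- ===== PORT A =====
-- A's recursion: len == 0 → True; st[0] == 'a' → recurse on st[1:] (= rest);
-- st.startswith('bb') → recurse on st[2:] (= rest.drop 1); else False.
def isValidA : List Char → Bool
  | [] => true
  | c :: rest =>
    if c = 'a' then isValidA rest
    else if PySem.Chars.startswith (c :: rest) ['b', 'b'] then isValidA (rest.drop 1)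
    else false
termination_by cs => cs.length
decreasing_by all_goals (simp; try omega)

def is_valid_string (st : String) : Bool := isValidA st.toList

-- ===== PORT B =====
-- B's while-loop: index i over the fixed character list, i += 1 on 'a', i += 2 on "bb", else return False.
def isValidB (cs : List Char) (n i : Nat) : Bool :=
  if i < n then
    if cs.getD i ' ' = 'a' then isValidB cs n (i + 1)
    else if cs.getD i ' ' = 'b' ∧ i + 1 < n ∧ cs.getD (i + 1) ' ' = 'b' then isValidB cs n (i + 2)
    else false
  else true
termination_by n - i
decreasing_by all_goals omega

def is_valid_string_alt (st : String) : Bool := isValidB st.toList st.toList.length 0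

-- ===== PRECONDITION & SPEC =====
def Spec_is_valid_string (st : String) (out : Bool) : Prop := out = is_valid_string_alt st
instance (st : String) (out : Bool) : Decidable (Spec_is_valid_string st out) := by unfold Spec_is_valid_string; infer_instance

-- ===== CLAIM (what is proved, stated in full; the proofs are below) =====
def Claim_equal_is_valid_string : Prop := ∀ (st : String), Dom_is_valid_string st → Spec_is_valid_string st (is_valid_string st)

-- ===== LEMMAS AND PROOFS =====

-- Loop invariant: B's scan from index i computes A's answer on the suffix cs.drop i.
lemma isValidB_eq_isValidA_drop (cs : List Char) :
    ∀ (k i : Nat), cs.length ≤ i + k → isValidB cs cs.length i = isValidA (cs.drop i) := by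
  intro k
  induction k with
  | zero =>
    intro i h
    rw [isValidB, List.drop_eq_nil_of_le (by omega), if_neg (by omega), isValidA]
  | succ k ih =>
    intro i h
    by_cases hi : i < cs.length
    · have hd : cs.drop i = cs[i] :: cs.drop (i + 1) := List.drop_eq_getElem_cons hi
      rw [isValidB, if_pos hi, hd, isValidA, List.getD_eq_getElem cs ' ' hi]
      by_cases ha : cs[i] = 'a'
      · rw [if_pos ha, if_pos ha, ih (i+1) (by omega)]
      · rw [if_neg ha, if_neg ha]
        by_cases h1 : i + 1 < cs.length
        · have hd1 : cs.drop (i + 1) = cs[i+1] :: cs.drop (i + 2) := List.drop_eq_getElem_cons h1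
          rw [List.getD_eq_getElem cs ' ' h1, hd1]
          have hsw : PySem.Chars.startswith (cs[i] :: cs[i+1] :: cs.drop (i+2)) ['b','b']
              = ('b' == cs[i] && 'b' == cs[i+1]) := by
            simp [PySem.Chars.startswith, List.isPrefixOf]
          rw [hsw]
          by_cases hb : cs[i] = 'b' ∧ cs[i+1] = 'b'
          · rw [if_pos ⟨hb.1, h1, hb.2⟩, if_pos (by simp [hb.1, hb.2])]
            rw [ih (i+2) (by omega)]
            simp
          · rw [if_neg (by tauto), if_neg (by simp; tauto)]
        · have hd1 : cs.drop (i + 1) = [] := List.drop_eq_nil_of_le (by omega)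
          rw [hd1, if_neg (fun hc => absurd hc.2.1 (by omega)),
            if_neg (by simp [PySem.Chars.startswith, List.isPrefixOf])]
    · rw [isValidB, List.drop_eq_nil_of_le (by omega), if_neg (by omega), isValidA]

-- ===== VERDICT (by name: the statement is the Claim_ definition above) =====
theorem is_valid_string_spec : Claim_equal_is_valid_string := by
  intro st _
  unfold Spec_is_valid_string is_valid_string is_valid_string_alt
  rw [isValidB_eq_isValidA_drop st.toList st.toList.length 0 (by omega), List.drop_zero]
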